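-- pv_equiv track=rewrite | github.com/cmq2525/password_guessing | PII-III/test.py | del_dup
-- ===== SOURCE A (Python) =====
-- def del_dup(a):
--     result_list = list()
--     key_dict = dict()
--     for elem in a:
--         try:
--             if key_dict[elem[0]]:
--                 continue
--         except:
--             key_dict[elem[0]] = 1
--             result_list.append(elem)
--     return result_list
-- ===== SOURCE B (Python) =====
-- def del_dup(a):
--     out = []
--     rest = a
--     while rest:
--         head = rest[0]
--         out.append(head)
--         k = head[0]
--         rest = [e for e in rest[1:] if e[0] != k]
--     return out
-- ===== Notes on version B (the rewrite author's own statement) =====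
-- stated objective: alternative
-- what changed: Replaces A's single pass with a seen-key dict by a dict-free selection loop: repeatedly emit the head of the remaining list and filter out every later element with the same first item, so no key table or membership test exists at all.
import Mathlib
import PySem

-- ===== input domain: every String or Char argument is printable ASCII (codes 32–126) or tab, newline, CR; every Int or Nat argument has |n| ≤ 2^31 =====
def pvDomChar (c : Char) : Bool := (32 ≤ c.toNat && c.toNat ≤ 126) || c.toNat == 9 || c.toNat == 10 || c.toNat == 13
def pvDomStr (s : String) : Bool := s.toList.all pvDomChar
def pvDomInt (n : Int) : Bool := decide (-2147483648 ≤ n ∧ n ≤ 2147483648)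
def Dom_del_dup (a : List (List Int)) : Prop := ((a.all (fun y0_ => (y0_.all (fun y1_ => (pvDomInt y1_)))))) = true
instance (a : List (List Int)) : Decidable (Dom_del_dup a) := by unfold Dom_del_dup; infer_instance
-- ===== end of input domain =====

-- B replaces A's single pass with a seen-key dict by a dict-free selection loop (emit the head of
-- the remainder, filter out later elements with the same first item); alternative, same results.

-- ===== PORT A =====
-- Loop state: (result_list, key_dict). 'if key_dict[elem[0]]: continue' either continues (truthy)
-- or falls off the end of the body (falsy) — both leave the state unchanged; KeyError (key absent)
-- takes the except branch. elem[0] on an empty elem raises (pyGet? = none); there A re-raises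
-- IndexError inside the except block — excluded by Pre_; the port keeps the state there.
def del_dup (a : List (List Int)) : List (List Int) :=
  (a.foldl
    (fun (st : List (List Int) × PySem.Dict Int Int) elem =>
      match PySem.List.pyGet? elem 0 with
      | none => st
      | some k =>
        match st.2.get? k with
        | some _ => st
        | none => (st.1 ++ [elem], st.2.insert k 1))
    ([], PySem.Dict.empty)).1

-- ===== PORT B =====
-- while rest: head = rest[0]; out.append(head); k = head[0]; rest = [e for e in rest[1:] if e[0] != k].
-- head[0] / e[0] raise on an empty inner list (pyGet? = none) — those inputs are excluded by Pre_;
-- the port emits [head] there (never reached under Pre_).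
def del_dup_alt_loop (rest : List (List Int)) : List (List Int) :=
  match rest with
  | [] => []
  | head :: t =>
    match PySem.List.pyGet? head 0 with
    | none => [head]
    | some k => head :: del_dup_alt_loop (t.filter (fun e => !(PySem.List.pyGet? e 0 == some k)))
termination_by rest.length
decreasing_by simpa using Nat.lt_succ_of_le (by simpa using List.length_filter_le _ t.attach)

def del_dup_alt (a : List (List Int)) : List (List Int) := del_dup_alt_loop a

-- ===== PRECONDITION & SPEC =====
-- A raises IndexError on any empty inner list (elem[0] fails, then fails again inside the bare
-- except); B raises there too — excluded.
def Pre_del_dup (a : List (List Int)) : Prop := ∀ e ∈ a, e ≠ []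
instance (a : List (List Int)) : Decidable (Pre_del_dup a) := by unfold Pre_del_dup; infer_instance
def pvWitness_del_dup : List (List Int) := [[1, 2], [1, 3], [2, 4]]

def Spec_del_dup (a : List (List Int)) (out : List (List Int)) : Prop := out = del_dup_alt a
instance (a : List (List Int)) (out : List (List Int)) : Decidable (Spec_del_dup a out) := by unfold Spec_del_dup; infer_instance

-- ===== CLAIM (what is proved, stated in full; the proofs are below) =====
def Claim_equal_del_dup : Prop := ∀ (a : List (List Int)), Dom_del_dup a → Pre_del_dup a → Spec_del_dup a (del_dup a)

-- ===== LEMMAS AND PROOFS =====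

theorem pyGet?_zero_of_ne_nil {e : List Int} (h : e ≠ []) :
    ∃ k, PySem.List.pyGet? e 0 = some k := by
  cases e with
  | nil => exact absurd rfl h
  | cons x xs => exact ⟨x, by simp [PySem.List.pyGet?, PySem.List.pyIdx?]⟩

-- Invariant: A's fold, started from (res, kd), appends exactly what B's loop produces on the
-- remainder of l with the kd-keyed elements filtered away.
theorem del_dup_loop_inv (l : List (List Int)) (res : List (List Int))
    (kd : PySem.Dict Int Int) (hne : ∀ e ∈ l, e ≠ []) :
    (l.foldl
      (fun (st : List (List Int) × PySem.Dict Int Int) elem =>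
        match PySem.List.pyGet? elem 0 with
        | none => st
        | some k =>
          match st.2.get? k with
          | some _ => st
          | none => (st.1 ++ [elem], st.2.insert k 1))
      (res, kd)).1 =
    res ++ del_dup_alt_loop (l.filter
      (fun e => match PySem.List.pyGet? e 0 with
                | none => true
                | some k => (kd.get? k).isNone)) := by
  induction l generalizing res kd with
  | nil => simp [List.foldl_nil]; rw [del_dup_alt_loop]
  | cons e t ih =>
    obtain ⟨k, hk⟩ := pyGet?_zero_of_ne_nil (hne e (by simp))
    have hnt : ∀ x ∈ t, x ≠ [] := fun x hx => hne x (by simp [hx])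
    simp only [List.foldl_cons, List.filter_cons, hk]
    cases hg : kd.get? k with
    | some v =>
      simpa using ih res kd hnt
    | none =>
      simp only [Option.isNone_none, if_true]
      rw [del_dup_alt_loop]
      simp only [hk, List.filter_filter]
      have hpred : (fun x => !(PySem.List.pyGet? x 0 == some k) &&
                    (match PySem.List.pyGet? x 0 with
                      | none => true
                      | some k' => (kd.get? k').isNone)) =
          (fun x => match PySem.List.pyGet? x 0 with
                      | none => true
                      | some k' => (((kd.insert k 1).get? k').isNone)) := by
        funext x
        cases hx : PySem.List.pyGet? x 0 with
        | none => simp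
        | some k' =>
          by_cases hkk : k' = k
          · subst hkk; simp [PySem.Dict.get?_insert_self, hg]
          · simp [PySem.Dict.get?_insert_of_ne _ _ hkk, hkk]
      rw [hpred]
      simpa using ih (res ++ [e]) (kd.insert k 1) hnt

-- ===== VERDICT (by name: the statement is the Claim_ definition above) =====
theorem del_dup_spec : Claim_equal_del_dup := by
  intro a _ hpre
  unfold Spec_del_dup del_dup del_dup_alt
  rw [del_dup_loop_inv a [] PySem.Dict.empty hpre]
  have : (a.filter (fun e => match PySem.List.pyGet? e 0 with
            | none => true
            | some k => ((PySem.Dict.empty : PySem.Dict Int Int).get? k).isNone)) = a := by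
    apply List.filter_eq_self.mpr
    intro x _
    cases hx : PySem.List.pyGet? x 0 <;> simp [PySem.Dict.get?_empty]
  rw [this, List.nil_append]
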